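-- pv_equiv track=rewrite | github.com/mikeczech/challenges | foobar/level2_1.py | solution
-- ===== SOURCE A (Python) =====
-- def solution(total_lambs):
--     s_count = 1
--     g_count = 1
--
--     s_rem = total_lambs - 1
--     g_rem = total_lambs - 1
--
--     s_done = False
--     g_done = False
--
--     s_next_next_h = None
--     g_next_next_h = None
--
--     s_next_h = 1
--     g_next_h = 1
--
--     s_min_lambs = 1
--     g_min_lambs = 1
--
--     while not s_done or not g_done:
--         if s_next_next_h:
--             s_min_lambs = s_next_h + s_next_next_h
--         if g_next_next_h:
--             g_min_lambs = g_next_h + g_next_next_h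
--         s_max_lambs = 2 * s_next_h
--         g_max_lambs = 2 * g_next_h
--
--         if s_rem > 0 and s_min_lambs <= s_rem:
--             s_count += 1
--             s_next_next_h = s_next_h
--             s_next_h = s_min_lambs
--             s_rem -= s_min_lambs
--         else:
--             s_done = True
--
--         if g_rem > 0 and g_max_lambs <= g_rem:
--             g_count += 1
--             g_next_next_h = g_next_h
--             g_next_h = g_max_lambs
--             g_rem -= g_max_lambs
--         else:
--             g_done = True
--
--     return s_count - g_count
-- ===== SOURCE B (Python) =====
-- def solution(total_lambs):
--     n = total_lambs
--     # generous scheme: paying k henchmen costs 2**k - 1 lambs in total,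
--     # so the count is the largest k with 2**k <= n + 1, via bit_length (min 1).
--     g_count = max(1, (n + 1).bit_length() - 1) if n >= 1 else 1
--     # stingy scheme: build the table of cumulative Fibonacci costs 1,2,4,7,12,...
--     # (cost of paying 1,2,3,... henchmen) that fit in the budget; count = table size.
--     costs = []
--     tot, a, b = 0, 1, 1
--     while tot + a <= n:
--         tot += a
--         costs.append(tot)
--         a, b = b, a + b
--     s_count = max(1, len(costs))
--     return s_count - g_count
-- ===== Notes on version B (the rewrite author's own statement) =====
-- stated objective: alternative
-- what changed: Replaces A's fused greedy-subtraction simulation of both payout schemes with cost characterisations: the generous count is the closed form max(1,(n+1).bit_length()-1) since k henchmen cost 2^k-1 lambs, and the stingy count is the size of a table of cumulative Fibonacci costs that fit the budget.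
import Mathlib
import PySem

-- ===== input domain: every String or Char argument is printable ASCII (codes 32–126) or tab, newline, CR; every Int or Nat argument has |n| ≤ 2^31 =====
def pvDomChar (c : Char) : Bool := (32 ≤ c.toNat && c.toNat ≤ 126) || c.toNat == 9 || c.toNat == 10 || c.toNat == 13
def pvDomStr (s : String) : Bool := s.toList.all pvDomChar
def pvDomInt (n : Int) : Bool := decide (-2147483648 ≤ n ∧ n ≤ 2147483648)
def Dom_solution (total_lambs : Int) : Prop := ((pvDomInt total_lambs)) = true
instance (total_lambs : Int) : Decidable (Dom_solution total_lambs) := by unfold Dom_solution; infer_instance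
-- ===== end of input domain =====

-- B replaces A's fused greedy-subtraction simulation with cost characterisations
-- (closed-form bit_length for the generous count, a table of cumulative Fibonacci
-- costs for the stingy count); objective: alternative (same cost), equal return value.

-- ===== PORT A =====
-- state of one scheme in A's fused loop (count, remaining, done flag, next_next_h, next_h, min_lambs)
structure AState where
  count : Int
  rem : Int
  done : Bool
  nnh : Option Int
  nh : Int
  minl : Int

-- `if s_next_next_h:` — Python truthiness: None is falsy, 0 is falsy
def minlOf (s : AState) : Int :=
  match s.nnh with
  | some x => if x ≠ 0 then s.nh + x else s.minl
  | none => s.minl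

-- one loop-body pass for the stingy variables
def stepS (s : AState) : AState :=
  let m := minlOf s
  if s.rem > 0 ∧ m ≤ s.rem then
    ⟨s.count + 1, s.rem - m, s.done, some s.nh, m, m⟩
  else
    ⟨s.count, s.rem, true, s.nnh, s.nh, m⟩

-- one loop-body pass for the generous variables (g_min_lambs is updated but unused by the test)
def stepG (g : AState) : AState :=
  let m := minlOf g
  let mx := 2 * g.nh
  if g.rem > 0 ∧ mx ≤ g.rem then
    ⟨g.count + 1, g.rem - mx, g.done, some g.nh, mx, m⟩
  else
    ⟨g.count, g.rem, true, g.nnh, g.nh, m⟩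

-- `while not s_done or not g_done`; fuel 2*|total|+4 exceeds the iteration count
def loopAB : Nat → AState → AState → Int
  | 0, s, g => s.count - g.count
  | Nat.succ f, s, g =>
      if !s.done || !g.done then loopAB f (stepS s) (stepG g) else s.count - g.count

def solution (total_lambs : Int) : Int :=
  loopAB ((2 * total_lambs).toNat + 4)
    ⟨1, total_lambs - 1, false, none, 1, 1⟩
    ⟨1, total_lambs - 1, false, none, 1, 1⟩

-- ===== PORT B =====
-- stingy: the `while tot + a <= n` loop building the table of cumulative Fibonacci costs
def fibTable (n : Int) : Nat → Int → Int → Int → List Int → List Int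
  | 0, _, _, _, acc => acc
  | Nat.succ f, tot, a, b, acc =>
      if tot + a ≤ n then fibTable n f (tot + a) b (a + b) (acc ++ [tot + a]) else acc

-- (n+1).bit_length() for n ≥ 1 is Nat.log2 (n+1) + 1 (the Mathlib/core counterpart of the builtin)
def solution_alt (total_lambs : Int) : Int :=
  let n := total_lambs
  let g_count : Int := if n ≥ 1 then max 1 ((Nat.log2 (n + 1).toNat + 1 : Int) - 1) else 1
  let costs := fibTable n ((2 * n).toNat + 5) 0 1 1 []
  let s_count : Int := max 1 (costs.length : Int)
  s_count - g_count

-- ===== PRECONDITION & SPEC =====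
def Spec_solution (total_lambs : Int) (out : Int) : Prop := out = solution_alt total_lambs
instance (total_lambs : Int) (out : Int) : Decidable (Spec_solution total_lambs out) := by unfold Spec_solution; infer_instance

-- ===== CLAIM (what is proved, stated in full; the proofs are below) =====
def Claim_equal_solution : Prop := ∀ (total_lambs : Int), Dom_solution total_lambs → Spec_solution total_lambs (solution total_lambs)

-- ===== LEMMAS AND PROOFS =====

-- running only the stingy / only the generous scheme of A to completion
def loopS : Nat → AState → Int
  | 0, s => s.count
  | Nat.succ f, s => if !s.done then loopS f (stepS s) else s.count

def loopG : Nat → AState → Int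
  | 0, g => g.count
  | Nat.succ f, g => if !g.done then loopG f (stepG g) else g.count

-- a done state is stuck: its loop-body test is false
def GoodS (s : AState) : Prop := s.done = true → ¬(s.rem > 0 ∧ minlOf s ≤ s.rem)
def GoodG (g : AState) : Prop := g.done = true → ¬(g.rem > 0 ∧ 2 * g.nh ≤ g.rem)

lemma minlOf_stepS_else (s : AState) (h : ¬(s.rem > 0 ∧ minlOf s ≤ s.rem)) :
    minlOf (stepS s) = minlOf s := by
  simp only [stepS, if_neg h]
  cases hn : s.nnh with
  | none => simp [minlOf, hn]
  | some x => by_cases hx : x ≠ 0 <;> simp [minlOf, hn, hx]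

lemma goodS_step (s : AState) (h : GoodS s) : GoodS (stepS s) := by
  by_cases hc : s.rem > 0 ∧ minlOf s ≤ s.rem
  · cases hd : s.done with
    | false => intro hd'; simp [stepS, if_pos hc, hd] at hd'
    | true => exact absurd hc (h hd)
  · intro _
    have hm := minlOf_stepS_else s hc
    simp only [stepS, if_neg hc] at hm ⊢
    rw [hm]; exact hc

lemma goodG_step (g : AState) (h : GoodG g) : GoodG (stepG g) := by
  by_cases hc : g.rem > 0 ∧ 2 * g.nh ≤ g.rem
  · cases hd : g.done with
    | false => intro hd'; simp [stepG, if_pos hc, hd] at hd'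
    | true => exact absurd hc (h hd)
  · intro _
    simp only [stepG, if_neg hc]
    exact hc

lemma stepS_done (s : AState) (hd : s.done = true) (h : GoodS s) :
    (stepS s).count = s.count ∧ (stepS s).done = true := by
  simp [stepS, if_neg (h hd)]

lemma stepG_done (g : AState) (hd : g.done = true) (h : GoodG g) :
    (stepG g).count = g.count ∧ (stepG g).done = true := by
  simp [stepG, if_neg (h hd)]

lemma loopS_of_done (f : Nat) (s : AState) (hd : s.done = true) : loopS f s = s.count := by
  cases f <;> simp [loopS, hd]

lemma loopG_of_done (f : Nat) (g : AState) (hd : g.done = true) : loopG f g = g.count := by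
  cases f <;> simp [loopG, hd]

-- the fused loop equals the two single-scheme loops, subtracted
lemma loopAB_split (f : Nat) (s g : AState) (hs : GoodS s) (hg : GoodG g) :
    loopAB f s g = loopS f s - loopG f g := by
  induction f generalizing s g with
  | zero => rfl
  | succ f ih =>
    cases hsd : s.done with
    | false =>
      cases hgd : g.done with
      | false =>
        simp only [loopAB, loopS, loopG, hsd, hgd]
        simpa using ih (stepS s) (stepG g) (goodS_step s hs) (goodG_step g hg)
      | true =>
        have h1 := ih (stepS s) (stepG g) (goodS_step s hs) (goodG_step g hg)
        have h2 := stepG_done g hgd hg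
        simp only [loopAB, loopS, loopG, hsd, hgd, Bool.not_true, Bool.not_false,
          Bool.true_or, Bool.false_eq_true, ite_false, if_true,
          h1, loopG_of_done f (stepG g) h2.2, h2.1]
    | true =>
      cases hgd : g.done with
      | false =>
        have h1 := ih (stepS s) (stepG g) (goodS_step s hs) (goodG_step g hg)
        have h2 := stepS_done s hsd hs
        simp only [loopAB, loopS, loopG, hsd, hgd, Bool.not_true, Bool.not_false,
          Bool.or_true, Bool.false_eq_true, ite_false, if_true,
          h1, loopS_of_done f (stepS s) h2.2, h2.1]
      | true => simp [loopAB, loopS, loopG, hsd, hgd]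

-- ---- stingy side: A's loop equals a length count of B's table ----

-- length-only shadow of fibTable
def fibLen (n : Int) : Nat → Int → Int → Int → Int → Int
  | 0, _, _, _, c => c
  | Nat.succ f, tot, a, b, c =>
      if tot + a ≤ n then fibLen n f (tot + a) b (a + b) (c + 1) else c

lemma fibTable_length (n : Int) (f : Nat) :
    ∀ (tot a b : Int) (acc : List Int),
      ((fibTable n f tot a b acc).length : Int) = fibLen n f tot a b (acc.length : Int) := by
  induction f with
  | zero => intro tot a b acc; rfl
  | succ f ih =>
    intro tot a b acc
    by_cases h : tot + a ≤ n
    · simp only [fibTable, fibLen, if_pos h, ih]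
      congr 1
      simp
    · simp [fibTable, fibLen, if_neg h]

lemma fibLen_ge (n : Int) (f : Nat) :
    ∀ (tot a b c : Int), c ≤ fibLen n f tot a b c := by
  induction f with
  | zero => intro tot a b c; exact le_refl c
  | succ f ih =>
    intro tot a b c
    by_cases h : tot + a ≤ n
    · simp only [fibLen, if_pos h]
      exact le_trans (by omega) (ih (tot + a) b (a + b) (c + 1))
    · simp [fibLen, if_neg h]

-- correspondence between A's stingy state and B's running-total loop
def RelS (n : Int) (s : AState) (tot a b c : Int) : Prop :=
  s.done = false ∧ s.count = c ∧ minlOf s = a ∧ a + s.nh = b ∧ tot = n - s.rem ∧ 1 ≤ a ∧ 1 ≤ s.nh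

lemma loopS_fibLen (n : Int) (f : Nat) (s : AState) (tot a b c : Int)
    (h : RelS n s tot a b c) : loopS f s = fibLen n f tot a b c := by
  induction f generalizing s tot a b c with
  | zero => exact h.2.1
  | succ f ih =>
    obtain ⟨hd, hc, hm, hb, ht, ha1, hn1⟩ := h
    simp only [loopS, fibLen, hd, Bool.not_false, if_true]
    by_cases hcond : tot + a ≤ n
    · have hcond' : s.rem > 0 ∧ minlOf s ≤ s.rem := by rw [hm]; omega
      rw [if_pos hcond]
      apply ih
      have hstep : stepS s = ⟨s.count + 1, s.rem - minlOf s, s.done, some s.nh, minlOf s, minlOf s⟩ := by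
        simp [stepS, if_pos hcond']
      have hnh : s.nh ≠ 0 := by omega
      generalize hM : minlOf s = M at hstep hm
      refine ⟨?_, ?_, ?_, ?_, ?_, ?_, ?_⟩
      · simp [hstep, hd]
      · simp [hstep]; omega
      · simp [hstep, minlOf, hnh]; omega
      · simp [hstep]; omega
      · simp [hstep]; omega
      · omega
      · simp [hstep]; omega
    · have hcond' : ¬(s.rem > 0 ∧ minlOf s ≤ s.rem) := by rw [hm]; omega
      rw [if_neg hcond]
      have h2 : (stepS s).done = true ∧ (stepS s).count = c := by
        simp [stepS, if_neg hcond', hc]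
      rw [loopS_of_done f (stepS s) h2.1, h2.2]

-- ---- generous side: A's loop equals the greedy doubling loop, then log2 ----

-- greedy doubling shadow of A's generous scheme (proof helper)
def dblLoop : Nat → Int → Int → Int → Int
  | 0, _, _, c => c
  | Nat.succ f, rem, p, c =>
      if rem > 0 ∧ p ≤ rem then dblLoop f (rem - p) (2 * p) (c + 1) else c

def RelG (g : AState) (rem p c : Int) : Prop :=
  g.done = false ∧ g.rem = rem ∧ g.count = c ∧ p = 2 * g.nh

lemma loopG_dbl (f : Nat) (g : AState) (rem p c : Int) (h : RelG g rem p c) :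
    loopG f g = dblLoop f rem p c := by
  induction f generalizing g rem p c with
  | zero => exact h.2.2.1
  | succ f ih =>
    obtain ⟨hd, hr, hc, hp⟩ := h
    simp only [loopG, dblLoop, hd, Bool.not_false, if_true]
    by_cases hcond : rem > 0 ∧ p ≤ rem
    · have hcond' : g.rem > 0 ∧ 2 * g.nh ≤ g.rem := by rw [hr, ← hp]; exact hcond
      rw [if_pos hcond]
      apply ih
      have hstep : stepG g = ⟨g.count + 1, g.rem - 2 * g.nh, g.done, some g.nh, 2 * g.nh, minlOf g⟩ := by
        simp [stepG, if_pos hcond']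
      refine ⟨?_, ?_, ?_, ?_⟩
      · simp [hstep, hd]
      · simp [hstep]; omega
      · simp [hstep]; omega
      · simp [hstep]; omega
    · have hcond' : ¬(g.rem > 0 ∧ 2 * g.nh ≤ g.rem) := by rw [hr, ← hp]; exact hcond
      rw [if_neg hcond]
      have h2 : (stepG g).done = true ∧ (stepG g).count = c := by
        simp [stepG, if_neg hcond', hc]
      rw [loopG_of_done f (stepG g) h2.1, h2.2]

-- the greedy doubling loop computes log2: from state (N - 2^t, 2^t) it does log2 N - t more accepts
lemma dblLoop_log2 (N : Nat) (hN : 2 ≤ N) :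
    ∀ (f t : Nat) (c : Int), 1 ≤ t → t ≤ Nat.log2 N → Nat.log2 N - t ≤ f →
      dblLoop f ((N : Int) - 2 ^ t) ((2 : Int) ^ t) c = c + (Nat.log2 N : Int) - t := by
  intro f
  induction f with
  | zero =>
    intro t c _ h2 h3
    have : t = Nat.log2 N := by omega
    subst this
    simp [dblLoop]
  | succ f ih =>
    intro t c h1 h2 h3
    have hne : N ≠ 0 := by omega
    have hself : 2 ^ Nat.log2 N ≤ N := Nat.log2_self_le hne
    have hub : N < 2 ^ (Nat.log2 N + 1) := (Nat.log2_lt hne).mp (Nat.lt_succ_self _)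
    have hcast : ((2 : Int) ^ t) = ((2 ^ t : Nat) : Int) := by push_cast; ring
    by_cases ht : t = Nat.log2 N
    · subst ht
      have hfail : ¬(((N : Int) - 2 ^ Nat.log2 N > 0) ∧ (2 : Int) ^ Nat.log2 N ≤ (N : Int) - 2 ^ Nat.log2 N) := by
        rw [hcast]
        have : (2 ^ (Nat.log2 N + 1) : Nat) = 2 * 2 ^ Nat.log2 N := by ring
        omega
      simp only [dblLoop, if_neg hfail]
      omega
    · have htlt : t < Nat.log2 N := by omega
      have hstep : 2 ^ (t + 1) ≤ N :=
        le_trans (Nat.pow_le_pow_right (by norm_num) (by omega)) hself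
      have hcast1 : ((2 : Int) ^ (t + 1)) = ((2 ^ (t + 1) : Nat) : Int) := by push_cast; ring
      have hpow : (2 ^ (t + 1) : Nat) = 2 * 2 ^ t := by ring
      have hok : (((N : Int) - 2 ^ t > 0) ∧ (2 : Int) ^ t ≤ (N : Int) - 2 ^ t) := by
        rw [hcast]
        have h2t : (1 : Nat) ≤ 2 ^ t := Nat.one_le_two_pow
        omega
      simp only [dblLoop, if_pos hok]
      have harg1 : (N : Int) - 2 ^ t - 2 ^ t = (N : Int) - 2 ^ (t + 1) := by ring
      have harg2 : 2 * (2 : Int) ^ t = 2 ^ (t + 1) := by ring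
      rw [harg1, harg2, ih (t + 1) (c + 1) (by omega) (by omega) (by omega)]
      omega

-- ===== VERDICT (by name: the statement is the Claim_ definition above) =====
theorem solution_spec : Claim_equal_solution := by
  intro n _
  show solution n = solution_alt n
  unfold solution solution_alt
  simp only []
  rw [loopAB_split _ _ _ (by intro h; simp at h) (by intro h; simp at h)]
  rw [fibTable_length]
  by_cases hn : n ≥ 1
  · -- fuel for B's table loop is one more than A's, absorbing the first payout's step
    have hfuel : (2 * n).toNat + 5 = ((2 * n).toNat + 4) + 1 := by omega
    rw [hfuel]
    have hstep1 : fibLen n (((2 * n).toNat + 4) + 1) 0 1 1 (([] : List Int).length : Int)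
        = fibLen n ((2 * n).toNat + 4) 1 1 2 1 := by
      simp only [fibLen, List.length_nil, Int.natCast_zero]
      rw [if_pos (by omega : (0 : Int) + 1 ≤ n)]
      norm_num
    rw [hstep1]
    have hS : loopS ((2 * n).toNat + 4) ⟨1, n - 1, false, none, 1, 1⟩
        = fibLen n ((2 * n).toNat + 4) 1 1 2 1 := by
      apply loopS_fibLen
      exact ⟨rfl, rfl, rfl, show (1 : Int) + 1 = 2 by norm_num,
        show (1 : Int) = n - (n - 1) by ring, le_refl 1, le_refl 1⟩
    have hSge : (1 : Int) ≤ fibLen n ((2 * n).toNat + 4) 1 1 2 1 := fibLen_ge n _ 1 1 2 1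
    set N := (n + 1).toNat with hNdef
    have hNI : (N : Int) = n + 1 := Int.toNat_of_nonneg (by omega)
    have hN2 : 2 ≤ N := by omega
    have hne : N ≠ 0 := by omega
    have hL1 : 1 ≤ Nat.log2 N := (Nat.le_log2 hne).mpr (by omega)
    have hLlt : Nat.log2 N < 2 ^ Nat.log2 N := Nat.lt_two_pow_self
    have hLle : 2 ^ Nat.log2 N ≤ N := Nat.log2_self_le hne
    have hfuel2 : Nat.log2 N - 1 ≤ (2 * n).toNat + 4 := by omega
    have hG : loopG ((2 * n).toNat + 4) ⟨1, n - 1, false, none, 1, 1⟩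
        = 1 + (Nat.log2 N : Int) - 1 := by
      rw [loopG_dbl _ _ (n - 1) 2 1 ⟨rfl, rfl, rfl, by norm_num⟩]
      have e1 : (n - 1 : Int) = (N : Int) - 2 ^ 1 := by rw [hNI]; ring
      have e2 : (2 : Int) = (2 : Int) ^ 1 := by norm_num
      rw [e1, e2]
      exact dblLoop_log2 N hN2 _ 1 1 (le_refl 1) hL1 hfuel2
    rw [hS, hG, if_pos hn]
    have : max 1 ((Nat.log2 N : Int) + 1 - 1) = (Nat.log2 N : Int) := by omega
    rw [this]
    omega
  · -- n ≤ 0: both schemes pay only the always-paid first henchman on each side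
    have hn0 : n ≤ 0 := by omega
    have htn : (2 * n).toNat = 0 := by omega
    rw [htn]
    set s0 : AState := ⟨1, n - 1, false, none, 1, 1⟩ with hs0
    have hcondS : ¬(s0.rem > 0 ∧ minlOf s0 ≤ s0.rem) := by
      show ¬(n - 1 > 0 ∧ minlOf s0 ≤ n - 1)
      have hm : minlOf s0 = 1 := rfl
      rw [hm]; omega
    have hcondG : ¬(s0.rem > 0 ∧ 2 * s0.nh ≤ s0.rem) := by
      show ¬(n - 1 > 0 ∧ 2 * 1 ≤ n - 1)
      omega
    have hdS : (stepS s0).done = true ∧ (stepS s0).count = 1 := by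
      simp only [stepS, if_neg hcondS]
      simp [hs0]
    have hdG : (stepG s0).done = true ∧ (stepG s0).count = 1 := by
      simp only [stepG, if_neg hcondG]
      simp [hs0]
    have hS : loopS (0 + 4) s0 = 1 := by
      have h1 : loopS (0 + 4) s0 = if !s0.done then loopS 3 (stepS s0) else s0.count := rfl
      rw [h1]
      have hd : s0.done = false := rfl
      rw [hd]
      simp only [Bool.not_false, if_true]
      rw [loopS_of_done _ _ hdS.1, hdS.2]
    have hG : loopG (0 + 4) s0 = 1 := by
      have h1 : loopG (0 + 4) s0 = if !s0.done then loopG 3 (stepG s0) else s0.count := rfl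
      rw [h1]
      have hd : s0.done = false := rfl
      rw [hd]
      simp only [Bool.not_false, if_true]
      rw [loopG_of_done _ _ hdG.1, hdG.2]
    have hFib : fibLen n (0 + 5) 0 1 1 (([] : List Int).length : Int) = 0 := by
      simp only [fibLen, List.length_nil, Int.natCast_zero]
      rw [if_neg (by omega : ¬((0 : Int) + 1 ≤ n))]
    rw [hS, hG, hFib, if_neg hn]
    norm_num
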